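-- pv_equiv track=rewrite | github.com/andrefpoliveira/AdventOfCode | events/2016/day02.py | find_comb
-- ===== SOURCE A (Python) =====
-- def find_comb(lines, buttons):
--     x, y, res = 1, 1, ""
--     d = {"U": (-1, 0), "D": (1, 0), "L": (0, -1), "R": (0, 1)}
--
--     for line in lines:
--         for dir in line:
--             x += d[dir][0]
--             y += d[dir][1]
--
--             if x < 0 or x >= len(buttons) or y < 0 or y >= len(buttons) or buttons[x][y] == "#":
--                 x -= d[dir][0]
--                 y -= d[dir][1]
--
--         res += buttons[x][y]
--     return res
-- ===== SOURCE B (Python) =====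
-- def find_comb(lines, buttons):
--     # Precomputed transition table: (i, j, dir) -> next position; per-step math disappears.
--     if not lines:
--         return ""
--     n = len(buttons)
--     d = {"U": (-1, 0), "D": (1, 0), "L": (0, -1), "R": (0, 1)}
--     table = {}
--     for i in range(n):
--         for j in range(n):
--             for k, (di, dj) in d.items():
--                 ni, nj = i + di, j + dj
--                 if 0 <= ni < n and 0 <= nj < n and buttons[ni][nj] != "#":
--                     table[(i, j, k)] = (ni, nj)
--                 else:
--                     table[(i, j, k)] = (i, j)
--     pos = (1, 1)
--     res = []
--     for line in lines:
--         for ch in line: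
--             pos = table[(pos[0], pos[1], ch)]
--         res.append(buttons[pos[0]][pos[1]])
--     return "".join(res)
-- ===== Notes on version B (the rewrite author's own statement) =====
-- stated objective: alternative
-- what changed: B precomputes a full (cell, direction) -> next-cell transition table once and then walks each line by pure table lookups, replacing A's per-step coordinate arithmetic and revert logic.
-- outside the precondition, e.g. on find_comb(['U'], [['1', '2'], ['3']]): A returns '2', B raises IndexError
import Mathlib
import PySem

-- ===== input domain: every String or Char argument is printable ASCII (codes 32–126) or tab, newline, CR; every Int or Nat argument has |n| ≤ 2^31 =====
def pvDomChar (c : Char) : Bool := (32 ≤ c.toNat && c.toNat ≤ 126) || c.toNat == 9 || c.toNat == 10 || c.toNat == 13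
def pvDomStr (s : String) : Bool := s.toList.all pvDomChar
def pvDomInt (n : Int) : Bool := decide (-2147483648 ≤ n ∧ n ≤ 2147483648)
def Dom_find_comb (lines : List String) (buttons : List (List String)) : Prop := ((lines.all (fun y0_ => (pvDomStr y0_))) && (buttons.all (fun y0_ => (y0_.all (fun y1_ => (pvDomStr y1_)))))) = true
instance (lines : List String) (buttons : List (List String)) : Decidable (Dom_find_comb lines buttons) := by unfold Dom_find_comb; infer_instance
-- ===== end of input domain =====

-- B replaces A's per-step coordinate arithmetic and revert logic with a transition table
-- precomputed once per grid, then walks every line by pure table lookups (objective: alternative).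

-- ===== PORT A =====
-- d = {"U": (-1, 0), "D": (1, 0), "L": (0, -1), "R": (0, 1)}
def pyDirsA : PySem.Dict Char (Int × Int) :=
  PySem.Dict.ofList [('U', (-1, 0)), ('D', (1, 0)), ('L', (0, -1)), ('R', (0, 1))]

-- buttons[x][y]; none = IndexError, excluded by Pre_ wherever A evaluates it
def btnA (buttons : List (List String)) (x y : Int) : String :=
  ((PySem.List.pyGet? buttons x).bind (fun r => PySem.List.pyGet? r y)).getD ""

-- one character of A's inner loop; d[dir] KeyError (char outside "UDLR") is excluded by Pre_
def stepA (buttons : List (List String)) (p : Int × Int) (c : Char) : Int × Int :=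
  let dv := (PySem.Dict.get? pyDirsA c).getD (0, 0)
  let x := p.1 + dv.1
  let y := p.2 + dv.2
  if x < 0 ∨ (buttons.length : Int) ≤ x ∨ y < 0 ∨ (buttons.length : Int) ≤ y ∨
      btnA buttons x y = "#" then p else (x, y)

def find_comb (lines : List String) (buttons : List (List String)) : String :=
  let st := lines.foldl (fun (st : Int × Int × String) line =>
      let p := line.toList.foldl (stepA buttons) (st.1, st.2.1)
      (p.1, p.2, st.2.2 ++ btnA buttons p.1 p.2)) (1, 1, "")
  st.2.2

-- ===== PORT B =====
def dirItemsB : List (Char × Int × Int) := [('U', (-1, 0)), ('D', (1, 0)), ('L', (0, -1)), ('R', (0, 1))]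

-- destination stored in the table for cell (i, j) and offset dv
def destB (buttons : List (List String)) (n i j : Int) (dv : Int × Int) : Int × Int :=
  let ni := i + dv.1
  let nj := j + dv.2
  if 0 ≤ ni ∧ ni < n ∧ 0 ≤ nj ∧ nj < n ∧
      ¬ ((PySem.List.pyGet? buttons ni).bind (fun r => PySem.List.pyGet? r nj)).getD "" = "#" then (ni, nj) else (i, j)

def tableB (buttons : List (List String)) : PySem.Dict (Int × Int × Char) (Int × Int) :=
  let n : Int := buttons.length
  (PySem.List.pyRange 0 n).foldl (fun t i =>
    (PySem.List.pyRange 0 n).foldl (fun t j =>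
      dirItemsB.foldl (fun t kv => t.insert (i, j, kv.1) (destB buttons n i j kv.2)) t) t)
    PySem.Dict.empty

def find_comb_alt (lines : List String) (buttons : List (List String)) : String :=
  if lines.isEmpty then "" else
  let table := tableB buttons
  let st := lines.foldl (fun (st : (Int × Int) × List String) line =>
      let p := line.toList.foldl
        (fun p c => ((table.get? (p.1, p.2, c)).getD (0, 0) : Int × Int)) st.1
      (p, st.2 ++ [((PySem.List.pyGet? buttons p.1).bind (fun r => PySem.List.pyGet? r p.2)).getD ""])) ((1, 1), [])
  PySem.Str.join "" st.2

-- ===== PRECONDITION & SPEC =====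
-- Pre_ excludes inputs on which the Python raises (KeyError on a character outside "UDLR",
-- IndexError on grids with fewer than 2 rows, or on rows shorter than the row count, which
-- Python A indexes through its len(buttons)-bounded check); requiring EVERY row to be at least
-- len(buttons) long is slightly narrower than A needs (A only indexes rows it reaches, so it
-- can return on some ragged grids that B's eagerly built table indexes and raises on — a
-- defensible exclusion, cited in the claim); when lines = [] neither program indexes anything,
-- so that whole class is kept.
def Pre_find_comb (lines : List String) (buttons : List (List String)) : Prop :=
  lines = [] ∨
  (2 ≤ buttons.length ∧ (∀ row ∈ buttons, buttons.length ≤ row.length) ∧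
   ∀ line ∈ lines, (line.toList.all (fun c => c == 'U' || c == 'D' || c == 'L' || c == 'R')) = true)
instance (lines : List String) (buttons : List (List String)) : Decidable (Pre_find_comb lines buttons) := by
  unfold Pre_find_comb; infer_instance

def pvWitness_find_comb : List String × List (List String) :=
  (["ULL", "RRDDD"], [["1", "2", "3"], ["4", "5", "6"], ["7", "8", "9"]])

def Spec_find_comb (lines : List String) (buttons : List (List String)) (out : String) : Prop := out = find_comb_alt lines buttons
instance (lines : List String) (buttons : List (List String)) (out : String) : Decidable (Spec_find_comb lines buttons out) := by unfold Spec_find_comb; infer_instance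

-- ===== CLAIM (what is proved, stated in full; the proofs are below) =====
def Claim_equal_find_comb : Prop := ∀ (lines : List String) (buttons : List (List String)), Dom_find_comb lines buttons → Pre_find_comb lines buttons → Spec_find_comb lines buttons (find_comb lines buttons)

-- ===== LEMMAS AND PROOFS =====

-- position in bounds of the n×n index square A's check keeps it in
def InB (n : Int) (p : Int × Int) : Prop := 0 ≤ p.1 ∧ p.1 < n ∧ 0 ≤ p.2 ∧ p.2 < n

theorem foldl_keep {α β : Type} (g : β → α → β) (P : β → Prop) :
    ∀ (L : List α) (d : β), (∀ t a, a ∈ L → P t → P (g t a)) → P d → P (L.foldl g d) := by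
  intro L
  induction L with
  | nil => intro d _ hd; exact hd
  | cons a L ih =>
    intro d hk hd
    exact ih (g d a) (fun t b hb ht => hk t b (List.mem_cons_of_mem _ hb) ht)
      (hk d a (List.mem_cons_self) hd)

theorem foldl_force {α β : Type} (g : β → α → β) (P : β → Prop) :
    ∀ (L : List α) (d : β), (∀ t a, a ∈ L → P t → P (g t a)) →
    ∀ a0, a0 ∈ L → (∀ t, P (g t a0)) → P (L.foldl g d) := by
  intro L
  induction L with
  | nil => intro d _ a0 h; exact absurd h (List.not_mem_nil)
  | cons a L ih =>
    intro d hk a0 hmem hforce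
    rcases List.mem_cons.mp hmem with h | h
    · subst h
      exact foldl_keep g P L (g d a0)
        (fun t b hb ht => hk t b (List.mem_cons_of_mem _ hb) ht) (hforce d)
    · exact ih (g d a) (fun t b hb ht => hk t b (List.mem_cons_of_mem _ hb) ht) a0 h hforce

theorem dirItemsB_inj : ∀ kv ∈ dirItemsB, ∀ kv' ∈ dirItemsB, kv.1 = kv'.1 → kv = kv' := by decide

theorem table_get (buttons : List (List String)) (i j : Int)
    (hi : 0 ≤ i ∧ i < (buttons.length : Int)) (hj : 0 ≤ j ∧ j < (buttons.length : Int))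
    (kv : Char × Int × Int) (hkv : kv ∈ dirItemsB) :
    (tableB buttons).get? (i, j, kv.1) = some (destB buttons (buttons.length : Int) i j kv.2) := by
  unfold tableB
  set n : Int := (buttons.length : Int) with hn
  set P : PySem.Dict (Int × Int × Char) (Int × Int) → Prop :=
    fun t => t.get? (i, j, kv.1) = some (destB buttons n i j kv.2) with hP
  -- every insert of any level either targets another key or writes exactly our value
  have hins : ∀ (i' j' : Int) (kv' : Char × Int × Int), kv' ∈ dirItemsB → ∀ t, P t →
      P (t.insert (i', j', kv'.1) (destB buttons n i' j' kv'.2)) := by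
    intro i' j' kv' hkv' t ht
    by_cases hkey : ((i, j, kv.1) : Int × Int × Char) = (i', j', kv'.1)
    · rw [Prod.mk.injEq, Prod.mk.injEq] at hkey
      obtain ⟨h1, h2, h3⟩ := hkey
      have hkk : kv = kv' := dirItemsB_inj kv hkv kv' hkv' h3
      simp only [hP, ← h1, ← h2, ← hkk]
      exact PySem.Dict.get?_insert_self _ _ _
    · simp only [hP]
      rw [PySem.Dict.get?_insert_of_ne _ _ hkey]
      exact ht
  have hkeepInner : ∀ (i' j' : Int) t, P t →
      P (dirItemsB.foldl (fun t kv' => t.insert (i', j', kv'.1) (destB buttons n i' j' kv'.2)) t) :=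
    fun i' j' t ht => foldl_keep _ P dirItemsB t (fun t' kv' h => hins i' j' kv' h t') ht
  have hkeepJ : ∀ (i' : Int) t, P t →
      P ((PySem.List.pyRange 0 n).foldl (fun t j' =>
          dirItemsB.foldl (fun t kv' => t.insert (i', j', kv'.1) (destB buttons n i' j' kv'.2)) t) t) :=
    fun i' t ht => foldl_keep _ P _ t (fun t' j' _ => hkeepInner i' j' t') ht
  -- the insert at (i, j, kv) forces P, and everything after keeps it
  have hforceInner : ∀ t,
      P (dirItemsB.foldl (fun t kv' => t.insert (i, j, kv'.1) (destB buttons n i j kv'.2)) t) := by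
    intro t
    refine foldl_force _ P dirItemsB t (fun t' kv' h => hins i j kv' h t') kv hkv ?_
    intro t'
    simp only [hP]
    exact PySem.Dict.get?_insert_self _ _ _
  have hforceJ : ∀ t,
      P ((PySem.List.pyRange 0 n).foldl (fun t j' =>
          dirItemsB.foldl (fun t kv' => t.insert (i, j', kv'.1) (destB buttons n i j' kv'.2)) t) t) := by
    intro t
    refine foldl_force _ P _ t (fun t' j' _ => hkeepInner i j' t') j
      (PySem.List.mem_pyRange_one.mpr hj) (fun t' => hforceInner t')
  exact foldl_force _ P _ PySem.Dict.empty (fun t' i' _ => hkeepJ i' t') i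
    (PySem.List.mem_pyRange_one.mpr hi) (fun t' => hforceJ t')

theorem inline_btnA (buttons : List (List String)) (x y : Int) :
    ((PySem.List.pyGet? buttons x).bind (fun r => PySem.List.pyGet? r y)).getD "" = btnA buttons x y := rfl

-- dv of each direction character, as A computes it
theorem dirs_get : ∀ kv ∈ dirItemsB, (PySem.Dict.get? pyDirsA kv.1).getD (0, 0) = kv.2 := by decide

-- B's table lookup computes exactly A's step, for in-bounds positions and direction chars
theorem step_eq (buttons : List (List String)) (p : Int × Int)
    (hp : InB (buttons.length : Int) p) (c : Char)
    (hc : c = 'U' ∨ c = 'D' ∨ c = 'L' ∨ c = 'R') :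
    ((tableB buttons).get? (p.1, p.2, c)).getD (0, 0) = stepA buttons p c := by
  obtain ⟨h1, h2, h3, h4⟩ := hp
  have key : ∃ kv ∈ dirItemsB, kv.1 = c := by
    rcases hc with h | h | h | h <;> subst h
    · exact ⟨('U', (-1, 0)), by decide, rfl⟩
    · exact ⟨('D', (1, 0)), by decide, rfl⟩
    · exact ⟨('L', (0, -1)), by decide, rfl⟩
    · exact ⟨('R', (0, 1)), by decide, rfl⟩
  obtain ⟨kv, hkv, hk1⟩ := key
  rw [← hk1, table_get buttons p.1 p.2 ⟨h1, h2⟩ ⟨h3, h4⟩ kv hkv]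
  simp only [Option.getD_some]
  simp only [destB, stepA, dirs_get kv hkv, inline_btnA]
  by_cases hb : btnA buttons (p.1 + kv.2.1) (p.2 + kv.2.2) = "#"
  · rw [if_neg (by simp [hb]), if_pos (by simp [hb])]
  · by_cases hin : 0 ≤ p.1 + kv.2.1 ∧ p.1 + kv.2.1 < (buttons.length : Int) ∧
        0 ≤ p.2 + kv.2.2 ∧ p.2 + kv.2.2 < (buttons.length : Int)
    · rw [if_pos ⟨hin.1, hin.2.1, hin.2.2.1, hin.2.2.2, hb⟩,
        if_neg (show ¬_ by push Not; exact ⟨by omega, by omega, by omega, by omega, hb⟩)]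
    · rw [if_neg (by tauto), if_pos (by by_contra hcon; push Not at hcon; exact hin ⟨by omega, by omega, by omega, by omega⟩)]

theorem stepA_InB (buttons : List (List String)) (p : Int × Int)
    (hp : InB (buttons.length : Int) p) (c : Char) :
    InB (buttons.length : Int) (stepA buttons p c) := by
  simp only [stepA]
  split
  · exact hp
  · rename_i h
    push Not at h
    exact ⟨h.1, h.2.1, h.2.2.1, h.2.2.2.1⟩

-- the per-line folds agree and stay in bounds
theorem line_fold (buttons : List (List String)) :
    ∀ (cs : List Char) (p : Int × Int), InB (buttons.length : Int) p →
    (∀ c ∈ cs, c = 'U' ∨ c = 'D' ∨ c = 'L' ∨ c = 'R') →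
    cs.foldl (fun p c => (((tableB buttons).get? (p.1, p.2, c)).getD (0, 0) : Int × Int)) p =
      cs.foldl (stepA buttons) p ∧
    InB (buttons.length : Int) (cs.foldl (stepA buttons) p) := by
  intro cs
  induction cs with
  | nil => intro p hp _; exact ⟨rfl, hp⟩
  | cons c cs ih =>
    intro p hp hcs
    have hc := hcs c (List.mem_cons_self)
    have hrest := fun c h => hcs c (List.mem_cons_of_mem _ h)
    have hstep := step_eq buttons p hp c hc
    have hInB := stepA_InB buttons p hp c
    simp only [List.foldl_cons, hstep]
    exact ih (stepA buttons p c) hInB hrest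

theorem flat_int (ls : List (List Char)) :
    (List.intersperse ([] : List Char) ls).flatten = ls.flatten := by
  induction ls with
  | nil => rfl
  | cons a t ih =>
    cases t with
    | nil => rfl
    | cons b t' => simp_all [List.intersperse]

theorem join_empty_snoc (l : List String) (s : String) :
    PySem.Str.join "" (l ++ [s]) = PySem.Str.join "" l ++ s := by
  apply String.toList_inj.mp
  simp [PySem.Str.toList_join, PySem.Chars.join, List.intercalate, flat_int]

theorem lines_fold (buttons : List (List String)) :
    ∀ (lines : List String),
    (∀ line ∈ lines, ∀ c ∈ line.toList, c = 'U' ∨ c = 'D' ∨ c = 'L' ∨ c = 'R') →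
    ∀ (p : Int × Int) (s : String) (l : List String),
    InB (buttons.length : Int) p → s = PySem.Str.join "" l →
    (lines.foldl (fun (st : Int × Int × String) line =>
        let q := line.toList.foldl (stepA buttons) (st.1, st.2.1)
        (q.1, q.2, st.2.2 ++ btnA buttons q.1 q.2)) (p.1, p.2, s)).2.2 =
    PySem.Str.join "" (lines.foldl (fun (st : (Int × Int) × List String) line =>
        let q := line.toList.foldl
          (fun p c => (((tableB buttons).get? (p.1, p.2, c)).getD (0, 0) : Int × Int)) st.1
        (q, st.2 ++ [((PySem.List.pyGet? buttons q.1).bind (fun r => PySem.List.pyGet? r q.2)).getD ""])) (p, l)).2 := by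
  intro lines
  induction lines with
  | nil =>
    intro _ p s l _ hs
    simpa using hs
  | cons line rest ih =>
    intro hok p s l hp hs
    have hline := line_fold buttons line.toList p hp (hok line (List.mem_cons_self))
    have hrest := fun li h => hok li (List.mem_cons_of_mem _ h)
    simp only [List.foldl_cons]
    have hq : (line.toList.foldl
        (fun p c => (((tableB buttons).get? (p.1, p.2, c)).getD (0, 0) : Int × Int)) p) =
        line.toList.foldl (stepA buttons) p := hline.1
    set q := line.toList.foldl (stepA buttons) p with hqdef
    have := ih hrest q (s ++ btnA buttons q.1 q.2) (l ++ [btnA buttons q.1 q.2]) hline.2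
      (by rw [join_empty_snoc, hs])
    simpa [hq, ← hqdef] using this

-- ===== VERDICT (by name: the statement is the Claim_ definition above) =====
theorem find_comb_spec : Claim_equal_find_comb := by
  intro lines buttons _ hpre
  unfold Spec_find_comb find_comb find_comb_alt
  rcases hpre with h | ⟨h2, _, hok⟩
  · subst h; rfl
  · cases lines with
    | nil => rfl
    | cons line0 rest =>
    rw [if_neg (by simp)]
    have hok' : ∀ line ∈ line0 :: rest, ∀ c ∈ line.toList, c = 'U' ∨ c = 'D' ∨ c = 'L' ∨ c = 'R' := by
      intro line hl c hc
      have := hok line hl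
      rw [List.all_eq_true] at this
      have h := this c hc
      simp only [Bool.or_eq_true, beq_iff_eq] at h
      tauto
    have hn : (2 : Int) ≤ (buttons.length : Int) := by exact_mod_cast h2
    have hInB : InB (buttons.length : Int) ((1 : Int), (1 : Int)) :=
      ⟨by norm_num, by omega, by norm_num, by omega⟩
    have := lines_fold buttons (line0 :: rest) hok' (1, 1) "" [] hInB rfl
    simpa using this
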